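-- pv_equiv track=rewrite | github.com/chltndus0401/Programmers | 프로그래머스/2/70129. 이진 변환 반복하기/이진 변환 반복하기.py | solution
-- ===== SOURCE A (Python) =====
-- def solution(s):
--     cnt = 0
--     removed = 0
--     while s != "1":
--         zero = s.count('0')
--         removed += zero
--         s = bin(len(s) - zero)[2:]
--         cnt += 1
--     return [cnt, removed]
-- ===== SOURCE B (Python) =====
-- def solution(s):
--     # Build the whole trace of intermediate strings recursively, then aggregate
--     # with two staged passes (length for the step count, a sum for removed zeros).
--     def trace(t):
--         if t == "1":
--             return [t]
--         return [t] + trace(bin(len(t) - t.count('0'))[2:])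
--     ts = trace(s)
--     return [len(ts) - 1, sum(t.count('0') for t in ts)]
-- ===== Notes on version B (the rewrite author's own statement) =====
-- stated objective: alternative
-- what changed: B replaces A's while-loop with two mutated accumulators by a recursive function that materialises the full list of intermediate strings, then derives the answer in staged passes: the step count is the trace's length minus one and the removed zeros are a sum over the trace.
import Mathlib
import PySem

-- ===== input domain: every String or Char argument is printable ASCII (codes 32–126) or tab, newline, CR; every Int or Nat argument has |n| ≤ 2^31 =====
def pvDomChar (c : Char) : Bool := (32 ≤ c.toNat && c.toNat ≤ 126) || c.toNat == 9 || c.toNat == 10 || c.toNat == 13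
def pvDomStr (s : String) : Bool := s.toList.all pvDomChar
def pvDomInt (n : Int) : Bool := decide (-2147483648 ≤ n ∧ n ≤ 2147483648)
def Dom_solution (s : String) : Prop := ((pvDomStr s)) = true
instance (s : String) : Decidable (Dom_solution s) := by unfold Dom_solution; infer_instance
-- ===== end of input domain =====

-- B builds the full list of intermediate strings recursively and aggregates it in staged passes, instead of A's accumulator while-loop (objective: alternative; same cost).

-- ===== PORT A =====
-- while s != "1": zero = s.count('0'); removed += zero; s = bin(len(s)-zero)[2:]; cnt += 1
-- fuel (length of s + 2) only makes the recursion total; under Pre_ it is never exhausted.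
def solutionGo : Nat → List Char → Int → Int → List Int
  | 0, _, cnt, removed => [cnt, removed]
  | fuel + 1, cs, cnt, removed =>
    if cs = ['1'] then [cnt, removed]
    else
      -- zero = s.count('0') (inlined)
      solutionGo fuel (PySem.Int.toBinChars ((cs.length - PySem.Chars.count cs ['0'] : Nat) : Int))
        (cnt + 1) (removed + (PySem.Chars.count cs ['0'] : Int))

def solution (s : String) : List Int :=
  solutionGo (s.toList.length + 2) s.toList 0 0

-- ===== PORT B =====
-- def trace(t): return [t] if t == "1" else [t] + trace(bin(len(t)-t.count('0'))[2:])
-- fuel (length of s + 2) only makes the recursion total; under Pre_ it is never exhausted.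
def traceGo : Nat → List Char → List (List Char)
  | 0, cs => [cs]
  | fuel + 1, cs =>
    if cs = ['1'] then [cs]
    else cs :: traceGo fuel
      (PySem.Int.toBinChars ((cs.length - PySem.Chars.count cs ['0'] : Nat) : Int))

-- return [len(ts) - 1, sum(t.count('0') for t in ts)]
def solution_alt (s : String) : List Int :=
  let ts := traceGo (s.toList.length + 2) s.toList
  [(ts.length : Int) - 1, (ts.map (fun t => (PySem.Chars.count t ['0'] : Int))).sum]

-- ===== PRECONDITION & SPEC =====
-- Pre_ excludes exactly the inputs on which A never returns: if every character of s is '0'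
-- (including s = ""), A's loop reaches the string "0" and cycles on it forever (B recurses forever there too).
def Pre_solution (s : String) : Prop := s.toList.count '0' < s.toList.length
instance (s : String) : Decidable (Pre_solution s) := by unfold Pre_solution; infer_instance
def pvWitness_solution : String := "110010"

def Spec_solution (s : String) (out : List Int) : Prop := out = solution_alt s
instance (s : String) (out : List Int) : Decidable (Spec_solution s out) := by unfold Spec_solution; infer_instance

-- ===== CLAIM (what is proved, stated in full; the proofs are below) =====
def Claim_equal_solution : Prop := ∀ (s : String), Dom_solution s → Pre_solution s → Spec_solution s (solution s)

-- ===== LEMMAS AND PROOFS =====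

-- s.count('0') with a single-character pattern is plain character counting
theorem countGo_singleton (c : Char) :
    ∀ (l : List Char) (fuel acc : Nat), l.length ≤ fuel →
      PySem.Chars.count.go [c] fuel l acc = acc + l.count c := by
  intro l
  induction l with
  | nil => intro fuel acc _; cases fuel <;> simp [PySem.Chars.count.go]
  | cons h t ih =>
      intro fuel acc hf
      cases fuel with
      | zero => simp at hf
      | succ f =>
          have hlen : t.length ≤ f := by simp at hf; omega
          simp only [PySem.Chars.count.go, List.isPrefixOf, Bool.and_true]
          by_cases hc : c == h
          · have hh : h = c := (beq_iff_eq.mp hc).symm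
            simp only [hc, if_true, List.length_cons, List.length_nil, List.drop_succ_cons,
              List.drop_zero, ite_true]
            rw [ih f (acc + 1) hlen]
            simp [hh, List.count_cons]
            omega
          · simp only [hc, Bool.false_eq_true, ite_false]
            rw [ih f acc hlen]
            have hne : ¬ (h == c) = true := fun e => by
              simp [beq_iff_eq.mp e] at hc
            simp [List.count_cons, hne]

theorem count_singleton (l : List Char) (c : Char) :
    PySem.Chars.count l [c] = l.count c := by
  simp only [PySem.Chars.count, List.isEmpty_cons, Bool.false_eq_true, ite_false]
  exact (countGo_singleton c l l.length 0 le_rfl).trans (by omega)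

-- the binary-digit string bin(m)[2:] in structural form
def binN (m : Nat) : List Char :=
  if m < 2 then [Nat.digitChar m]
  else binN (m / 2) ++ [Nat.digitChar (m % 2)]
decreasing_by exact Nat.div_lt_self (by omega) (by omega)

theorem toDigitsCore_eq_binN :
    ∀ (fuel m : Nat) (acc : List Char), m < fuel →
      Nat.toDigitsCore 2 fuel m acc = binN m ++ acc := by
  intro fuel
  induction fuel with
  | zero => intro m acc h; omega
  | succ f ih =>
      intro m acc h
      rw [Nat.toDigitsCore]
      by_cases h2 : m < 2
      · have hd : m / 2 = 0 := by omega
        rw [binN]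
        simp [hd, h2, Nat.mod_eq_of_lt h2]
      · have hne : ¬ m / 2 = 0 := by omega
        simp only [hne, ite_false]
        rw [ih (m / 2) _ (by omega)]
        rw [binN.eq_1 m, if_neg h2]
        simp

theorem toBinChars_eq_binN (m : Nat) :
    PySem.Int.toBinChars ((m : Nat) : Int) = binN m := by
  have hneg : ¬ ((m : Int) < 0) := by omega
  simp only [PySem.Int.toBinChars, hneg, ite_false, Int.toNat_natCast]
  rw [Nat.toDigits, toDigitsCore_eq_binN (m + 1) m [] (Nat.lt_succ_self m)]
  simp

theorem binN_chars (m : Nat) : ∀ c ∈ binN m, c = '0' ∨ c = '1' := by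
  induction m using Nat.strong_induction_on with
  | _ m ih =>
      intro d hd
      rw [binN.eq_1] at hd
      by_cases h2 : m < 2
      · rw [if_pos h2] at hd
        simp at hd
        subst hd
        interval_cases m
        · left; rfl
        · right; rfl
      · rw [if_neg h2] at hd
        simp at hd
        rcases hd with hd | hd
        · exact ih (m / 2) (Nat.div_lt_self (by omega) (by omega)) d hd
        · have hm : m % 2 = 0 ∨ m % 2 = 1 := by omega
          rcases hm with h | h
          · left; rw [hd, h]; rfl
          · right; rw [hd, h]; rfl

theorem binN_length_pos (m : Nat) : 0 < (binN m).length := by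
  rw [binN.eq_1]
  by_cases h2 : m < 2 <;> simp [h2]

theorem binN_eq_one_iff (m : Nat) : binN m = ['1'] ↔ m = 1 := by
  constructor
  · intro h
    rw [binN.eq_1] at h
    by_cases h2 : m < 2
    · rw [if_pos h2] at h
      simp at h
      interval_cases m
      · exact absurd h (by decide)
      · rfl
    · rw [if_neg h2] at h
      have h1 := binN_length_pos (m / 2)
      have hlen : (binN (m / 2) ++ [Nat.digitChar (m % 2)]).length = 1 := by rw [h]; rfl
      rw [List.length_append, List.length_singleton] at hlen
      omega
  · intro h; subst h; rw [binN]; simp; rfl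

theorem binN_count_one (m : Nat) :
    (binN m).count '1' = PySem.Int.bitCount (m : Int) := by
  induction m using Nat.strong_induction_on with
  | _ m ih =>
      rw [binN.eq_1]
      by_cases h2 : m < 2
      · rw [if_pos h2]
        interval_cases m <;> simp [Nat.digitChar] <;> decide
      · rw [if_neg h2, PySem.Int.bitCount_natCast (by omega : 0 < m), List.count_append,
          ih (m / 2) (Nat.div_lt_self (by omega) (by omega))]
        have hm : m % 2 = 0 ∨ m % 2 = 1 := by omega
        rcases hm with h | h <;> rw [h] <;> simp [Nat.digitChar] <;> omega

theorem count_zero_of_binary :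
    ∀ (l : List Char), (∀ c ∈ l, c = '0' ∨ c = '1') →
      l.count '0' = l.length - l.count '1' := by
  intro l
  induction l with
  | nil => simp
  | cons c t ih =>
      intro h
      have hc := h c (by simp)
      have iht := ih (fun d hd => h d (by simp [hd]))
      have h1 : t.count '1' ≤ t.length := List.count_le_length
      rcases hc with rfl | rfl <;> simp [List.count_cons, iht] <;> omega

theorem bitCount_le_self (m : Nat) : PySem.Int.bitCount (m : Int) ≤ m := by
  induction m using Nat.strong_induction_on with
  | _ m ih =>
      rcases Nat.eq_zero_or_pos m with rfl | hpos
      · simp [PySem.Int.bitCount_natCast_zero]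
      · rw [PySem.Int.bitCount_natCast hpos]
        have := ih (m / 2) (Nat.div_lt_self hpos (by omega))
        omega

theorem bitCount_lt_self (m : Nat) (hm : 2 ≤ m) : PySem.Int.bitCount (m : Int) < m := by
  rw [PySem.Int.bitCount_natCast (by omega)]
  have := bitCount_le_self (m / 2)
  omega

theorem bitCount_pos (m : Nat) (hm : 1 ≤ m) : 1 ≤ PySem.Int.bitCount (m : Int) := by
  induction m using Nat.strong_induction_on with
  | _ m ih =>
      rw [PySem.Int.bitCount_natCast (by omega)]
      by_cases h2 : m < 2
      · have h1 : m = 1 := by omega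
        subst h1; simp [PySem.Int.bitCount_natCast_zero]
      · have := ih (m / 2) (Nat.div_lt_self (by omega) (by omega)) (by omega)
        omega

-- next string in the iteration, as computed by both ports on a binary string binN m
theorem next_of_binN (m : Nat) (hm : 1 ≤ m) :
    PySem.Int.toBinChars
        (((binN m).length - PySem.Chars.count (binN m) ['0'] : Nat) : Int)
      = binN (PySem.Int.bitCount (m : Int)) := by
  rw [count_singleton]
  have hc0 := count_zero_of_binary (binN m) (binN_chars m)
  have hc1 := binN_count_one m
  have hcle : (binN m).count '1' ≤ (binN m).length := List.count_le_length
  have harg : (binN m).length - (binN m).count '0' = PySem.Int.bitCount (m : Int) := by omega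
  rw [harg, toBinChars_eq_binN]

-- A's accumulator loop equals B's trace aggregated: step count = trace length - 1,
-- removed = sum of the zero counts over the trace.
theorem key :
    ∀ (m : Nat) (fuel : Nat) (cnt removed : Int), 1 ≤ m → m ≤ fuel →
      solutionGo fuel (binN m) cnt removed =
        [cnt + ((traceGo fuel (binN m)).length : Int) - 1,
         removed + ((traceGo fuel (binN m)).map
            (fun t => (PySem.Chars.count t ['0'] : Int))).sum] := by
  intro m
  induction m using Nat.strong_induction_on with
  | _ m ih =>
      intro fuel cnt removed h1 hf
      cases fuel with
      | zero => omega
      | succ f =>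
          by_cases hm1 : m = 1
          · subst hm1
            rw [solutionGo, traceGo, if_pos ((binN_eq_one_iff 1).mpr rfl),
              if_pos ((binN_eq_one_iff 1).mpr rfl)]
            have : binN 1 = ['1'] := (binN_eq_one_iff 1).mpr rfl
            rw [this]
            norm_num [count_singleton]
          · have h2 : 2 ≤ m := by omega
            have hne : binN m ≠ ['1'] := fun h => hm1 ((binN_eq_one_iff m).mp h)
            have hlt := bitCount_lt_self m h2
            have hpos := bitCount_pos m h1
            rw [solutionGo, traceGo, if_neg hne, if_neg hne, next_of_binN m h1,
              ih (PySem.Int.bitCount (m : Int)) hlt f _ _ hpos (by omega)]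
            simp only [List.length_cons, List.map_cons, List.sum_cons, List.cons.injEq,
              and_true]
            refine ⟨by push_cast; ring, by ring⟩

-- ===== VERDICT (by name: the statement is the Claim_ definition above) =====
theorem solution_spec : Claim_equal_solution := by
  intro s _ hpre
  unfold Spec_solution solution solution_alt
  unfold Pre_solution at hpre
  set cs := s.toList with hcs
  have hz : cs.count '0' ≤ cs.length := List.count_le_length
  have hfuel : cs.length + 2 = (cs.length + 1) + 1 := rfl
  rw [hfuel, solutionGo, traceGo]
  by_cases h1 : cs = ['1']
  · rw [if_pos h1, if_pos h1, h1]
    norm_num [count_singleton]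
  · rw [if_neg h1, if_neg h1]
    rw [count_singleton]
    set z := cs.count '0' with hzdef
    have hm1 : 1 ≤ cs.length - z := by omega
    rw [toBinChars_eq_binN]
    rw [key (cs.length - z) (cs.length + 1) (0 + 1) (0 + (z : Int)) hm1 (by omega)]
    simp only [List.length_cons, List.map_cons, List.sum_cons, List.cons.injEq, and_true,
      count_singleton]
    refine ⟨by push_cast; ring, by push_cast; ring⟩
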